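-- pv_equiv track=rewrite | github.com/kkr010128/codebert | problem121/problem121_77.py | get_keta
-- ===== SOURCE A (Python) =====
-- def get_keta(n):
--     i=1
--     check=26
--     while True:
--         if n<=check:
--             return i
--         check=check*26+26
--         i+=1
-- ===== SOURCE B (Python) =====
-- def get_keta(n):
--     i = 0
--     m = n
--     while m > 0:
--         m = (m - 1) // 26
--         i += 1
--     return max(i, 1)
-- ===== Notes on version B (the rewrite author's own statement) =====
-- stated objective: alternative
-- what changed: B counts bijective-base-26 digits by repeatedly shrinking the value with m=(m-1)//26 instead of comparing n against a growing cumulative threshold sum 26+26^2+...; max(i,1) reproduces A's value 1 for all n<=26.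
import Mathlib
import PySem

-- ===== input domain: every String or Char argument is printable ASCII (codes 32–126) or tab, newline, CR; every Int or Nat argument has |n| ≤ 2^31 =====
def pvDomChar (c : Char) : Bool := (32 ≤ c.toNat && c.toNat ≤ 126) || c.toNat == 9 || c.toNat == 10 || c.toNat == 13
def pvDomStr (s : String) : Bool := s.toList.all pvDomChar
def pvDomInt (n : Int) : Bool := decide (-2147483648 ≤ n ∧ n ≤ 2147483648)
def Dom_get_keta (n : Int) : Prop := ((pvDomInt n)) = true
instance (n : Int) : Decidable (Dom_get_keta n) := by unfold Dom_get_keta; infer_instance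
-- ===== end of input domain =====

-- B replaces A's growing cumulative threshold with a shrinking remainder m=(m-1)//26; same cost, alternative decomposition; return value only.

-- ===== PORT A =====
-- A's 'while True' loop: i and check evolve; terminates because check grows past n (check stays positive, carried as h).
def getKetaLoop (n i check : Int) (h : 0 < check) : Int :=
  if n ≤ check then i
  else getKetaLoop n (i + 1) (check * 26 + 26) (by omega)
termination_by (n - check).toNat
decreasing_by omega

def get_keta (n : Int) : Int := getKetaLoop n 1 26 (by norm_num)

-- ===== PORT B =====
-- B's 'while m > 0' loop.
def altLoop (m i : Int) : Int :=
  if 0 < m then altLoop (PySem.Int.floordiv (m - 1) 26) (i + 1) else i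
termination_by m.toNat
decreasing_by
  rename_i hm
  rw [PySem.Int.floordiv_eq_ediv_of_pos (by norm_num)]
  omega

def get_keta_alt (n : Int) : Int := max (altLoop n 0) 1

-- ===== PRECONDITION & SPEC =====
def Spec_get_keta (n : Int) (out : Int) : Prop := out = get_keta_alt n
instance (n : Int) (out : Int) : Decidable (Spec_get_keta n out) := by unfold Spec_get_keta; infer_instance

-- ===== CLAIM (what is proved, stated in full; the proofs are below) =====
def Claim_equal_get_keta : Prop := ∀ (n : Int), Dom_get_keta n → Spec_get_keta n (get_keta n)

-- ===== LEMMAS AND PROOFS =====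

-- (m-1)//26 ≤ c ↔ m ≤ 26c+26
theorem gstep_le_iff (m c : Int) : PySem.Int.floordiv (m - 1) 26 ≤ c ↔ m ≤ 26 * c + 26 := by
  rw [PySem.Int.floordiv_eq_ediv_of_pos (by norm_num : (0:Int) < 26)]
  omega

theorem getKetaLoop_congr (n i c c' : Int) (h : 0 < c) (e : c = c') :
    getKetaLoop n i c h = getKetaLoop n i c' (e ▸ h) := by
  subst e; rfl

-- commuting the two loops: growing the threshold once = shrinking the value once
theorem getKetaLoop_shift (c : Int) (hc : 0 < c) (m j : Int) :
    getKetaLoop m j (26 * c + 26) (by omega) =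
      getKetaLoop (PySem.Int.floordiv (m - 1) 26) j c hc := by
  conv_lhs => rw [getKetaLoop]
  conv_rhs => rw [getKetaLoop]
  by_cases h : m ≤ 26 * c + 26
  · rw [if_pos h, if_pos ((gstep_le_iff m c).mpr h)]
  · rw [if_neg h, if_neg (fun hx => h ((gstep_le_iff m c).mp hx))]
    have hc' : 0 < 26 * c + 26 := by omega
    have key := getKetaLoop_shift (26 * c + 26) hc' m (j + 1)
    exact ((getKetaLoop_congr _ _ _ _ _ (by ring)).trans key).trans
      (getKetaLoop_congr _ _ _ _ hc' (by ring : 26 * c + 26 = c * 26 + 26))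
termination_by (m - c).toNat
decreasing_by
  have := (gstep_le_iff m c).not.mpr (by assumption)
  omega

-- altLoop only ever increases its counter
theorem altLoop_ge (m i : Int) : i ≤ altLoop m i := by
  rw [altLoop]
  by_cases h : 0 < m
  · rw [if_pos h]
    have := altLoop_ge (PySem.Int.floordiv (m - 1) 26) (i + 1)
    omega
  · rw [if_neg h]
termination_by m.toNat
decreasing_by
  rw [PySem.Int.floordiv_eq_ediv_of_pos (by norm_num : (0:Int) < 26)]
  omega

-- A's loop at threshold 26 computes max(altLoop m (i-1), i)
theorem getKetaLoop_eq_alt (m i : Int) :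
    getKetaLoop m i 26 (by norm_num) = max (altLoop m (i - 1)) i := by
  conv_lhs => rw [getKetaLoop]
  by_cases h : m ≤ 26
  · rw [if_pos h]
    by_cases hm : 0 < m
    · have hg : PySem.Int.floordiv (m - 1) 26 = 0 := by
        rw [PySem.Int.floordiv_eq_ediv_of_pos (by norm_num : (0:Int) < 26)]
        omega
      rw [altLoop, if_pos hm, hg, altLoop, if_neg (by omega : ¬ (0:Int) < 0)]
      omega
    · rw [altLoop, if_neg hm]
      omega
  · rw [if_neg h]
    have hm : 0 < m := by omega
    have hg : 0 < PySem.Int.floordiv (m - 1) 26 := by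
      rw [PySem.Int.floordiv_eq_ediv_of_pos (by norm_num : (0:Int) < 26)]
      omega
    have hs := getKetaLoop_shift 26 (by norm_num) m (i + 1)
    rw [hs, getKetaLoop_eq_alt (PySem.Int.floordiv (m - 1) 26) (i + 1)]
    conv_rhs => rw [altLoop, if_pos hm]
    have hge := altLoop_ge (PySem.Int.floordiv (PySem.Int.floordiv (m - 1) 26 - 1) 26) (i + 1)
    rw [show i + 1 - 1 = i by ring, show i - 1 + 1 = i by ring]
    conv_rhs => rw [altLoop, if_pos hg]
    conv_lhs => rw [altLoop, if_pos hg]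
    omega
termination_by m.toNat
decreasing_by
  rw [PySem.Int.floordiv_eq_ediv_of_pos (by norm_num : (0:Int) < 26)]
  omega

-- ===== VERDICT (by name: the statement is the Claim_ definition above) =====
theorem get_keta_spec : Claim_equal_get_keta := by
  intro n _
  unfold Spec_get_keta get_keta get_keta_alt
  have h := getKetaLoop_eq_alt n 1
  rw [show (1:Int) - 1 = 0 by ring] at h
  rw [h]
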